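-- pv_equiv track=rewrite | github.com/ZhangSteven/dif_revised | dif.py | linesToRecords
-- ===== SOURCE A (Python) =====
-- class InvalidAccoutingInfo(Exception):
-- 	pass
--
-- def linesToRecords(headers, lines):
-- 	"""
-- 	lines: [list] a list of lines in the sub section, the first line being
-- 		the accounting treatment (like (i) held to maturity), the rest are
-- 		holdings
--
-- 	output: [iterable] a list of records in the sub section, with empty
-- 		positions filtered out.
-- 	"""
-- 	try:
-- 		accounting = getAccountingTreatment(lines[0])
-- 		startingLine = 1
-- 	except InvalidAccoutingInfo:
-- 		accounting = ''
-- 		startingLine = 0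
--
-- 	def lineToRecord(line):
-- 		headerValuePairs = filter(lambda x: x[0] != '', zip(headers, line))
-- 		return {key: value for (key, value) in headerValuePairs}
--
-- 	def addAccoutingInfo(record):
-- 		record['accounting'] = accounting
-- 		return record
--
-- 	return map(addAccoutingInfo, map(lineToRecord, lines[startingLine:]))
--
-- def getAccountingTreatment(line):
-- 	"""
-- 	line: the first line of a sub section
--
-- 	output: a string for the sub section's accouting treatment, i..e, htm,
-- 		afs, trading. Or raise an exception if not found.
-- 	"""
-- 	text = line[0].lower()
-- 	if 'trading' in text:
-- 		return 'trading'
-- 	elif 'held to maturity' in text or 'amortized cost' in text: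
-- 		return 'htm'
-- 	elif 'available for sales' in text or 'market value' in text:
-- 		return 'afs'
-- 	else:
-- 		raise InvalidAccoutingInfo()
-- ===== SOURCE B (Python) =====
-- class InvalidAccoutingInfo(Exception):
-- 	pass
--
-- def getAccountingTreatment(line):
-- 	text = line[0].lower()
-- 	if 'trading' in text:
-- 		return 'trading'
-- 	elif 'held to maturity' in text or 'amortized cost' in text:
-- 		return 'htm'
-- 	elif 'available for sales' in text or 'market value' in text:
-- 		return 'afs'
-- 	else:
-- 		raise InvalidAccoutingInfo()
--
-- def linesToRecords(headers, lines):
-- 	try: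
-- 		accounting = getAccountingTreatment(lines[0])
-- 		startingLine = 1
-- 	except InvalidAccoutingInfo:
-- 		accounting = ''
-- 		startingLine = 0
-- 	body = lines[startingLine:]
-- 	# column-major construction: one pass per non-empty header column,
-- 	# writing that column's value into every record that is long enough;
-- 	# columns beyond every line's length cannot contribute, so stop there
-- 	maxlen = max(map(len, body), default=0)
-- 	records = [{} for _ in body]
-- 	for i, h in enumerate(headers):
-- 		if i >= maxlen:
-- 			break
-- 		if h == '':
-- 			continue
-- 		for record, line in zip(records, body):
-- 			if i < len(line):
-- 				record[h] = line[i]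
-- 	for record in records:
-- 		record['accounting'] = accounting
-- 	return records
-- ===== Notes on version B (the rewrite author's own statement) =====
-- stated objective: alternative
-- what changed: B builds the records column-major: it allocates one empty dict per data line, then makes one pass per non-empty header column writing that column's value into every record long enough, instead of A's row-major filtered zip per line.
-- outside the precondition, e.g. on linesToRecords(['h'], []): A raises IndexError, B raises IndexError; on linesToRecords(['h'], [[], ['x']]): A raises IndexError, B raises IndexError
import Mathlib
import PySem

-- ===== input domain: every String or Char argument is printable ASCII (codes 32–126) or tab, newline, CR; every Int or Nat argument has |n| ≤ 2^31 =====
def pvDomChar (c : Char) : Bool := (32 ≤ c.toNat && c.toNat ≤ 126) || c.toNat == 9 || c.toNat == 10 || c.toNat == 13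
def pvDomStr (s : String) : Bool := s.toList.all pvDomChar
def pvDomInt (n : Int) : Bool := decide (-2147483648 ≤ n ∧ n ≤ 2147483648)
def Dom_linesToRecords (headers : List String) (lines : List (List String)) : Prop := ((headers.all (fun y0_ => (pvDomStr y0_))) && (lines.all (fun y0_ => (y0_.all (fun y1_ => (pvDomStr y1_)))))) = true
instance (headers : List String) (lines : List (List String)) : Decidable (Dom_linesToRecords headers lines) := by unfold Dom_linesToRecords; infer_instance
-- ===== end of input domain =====

-- B builds the records column-major (one sweep over the records per non-empty header column)
-- instead of A's row-major filtered zip per line; equivalence of the returned records is proved.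


-- Both Pythons use the module helper getAccountingTreatment unchanged; defined once, used by both ports.
-- Returns some treatment, or none where the Python raises InvalidAccoutingInfo; the line[0] IndexError
-- (empty first line) is excluded by Pre_ below, so headD "" is exact on Pre_.
def getAccTreat (line : List String) : Option String :=
  let text := PySem.Str.lower (line.headD "")
  if PySem.Str.isIn "trading" text then some "trading"
  else if PySem.Str.isIn "held to maturity" text || PySem.Str.isIn "amortized cost" text then some "htm"
  else if PySem.Str.isIn "available for sales" text || PySem.Str.isIn "market value" text then some "afs"
  else none

-- ===== PORT A =====
-- Literal port of A: per line, filter zip(headers, line) by non-empty header, build the dict,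
-- then set record['accounting']; dicts are rendered as their .items lists.
def linesToRecords (headers : List String) (lines : List (List String)) : List (List (String × String)) :=
  let (accounting, startingLine) :=
    match getAccTreat (lines.headD []) with
    | some a => (a, 1)
    | none => ("", 0)
  let lineToRecord := fun (line : List String) =>
    ((headers.zip line).filter (fun x => x.1 != "")).foldl
      (fun (d : PySem.Dict String String) kv => d.insert kv.1 kv.2) PySem.Dict.empty
  let addAccountingInfo := fun (r : PySem.Dict String String) => r.insert "accounting" accounting
  ((lines.drop startingLine).map lineToRecord).map (fun r => (addAccountingInfo r).items)

-- ===== PORT B =====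
-- Port of B: column-major. One empty dict per data line; then a fold over enumerate(headers),
-- cut off (the loop's break) at the maximum line length, that for each non-empty header column i
-- sweeps records zipped with their lines and writes line[i] into every record whose line is long
-- enough; finally 'accounting' is set on each.
def linesToRecords_alt (headers : List String) (lines : List (List String)) : List (List (String × String)) :=
  let (accounting, startingLine) :=
    match getAccTreat (lines.headD []) with
    | some a => (a, 1)
    | none => ("", 0)
  let body := lines.drop startingLine
  let maxLen : Int := body.foldl (fun m ln => max m (ln.length : Int)) 0
  let records0 : List (PySem.Dict String String) := body.map (fun _ => PySem.Dict.empty)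
  let records := ((PySem.List.enumerate headers).takeWhile (fun p => decide (p.1 < maxLen))).foldl
    (fun recs p =>
      if p.2 == "" then recs
      else (recs.zip body).map (fun q =>
        if p.1 < (q.2.length : Int) then q.1.insert p.2 (PySem.List.pyGetD q.2 p.1 "") else q.1))
    records0
  records.map (fun r => (r.insert "accounting" accounting).items)

-- ===== PRECONDITION & SPEC =====
-- Pre_ excludes exactly the inputs where A raises IndexError: an empty lines list (lines[0])
-- and an empty first line (line[0] inside getAccountingTreatment, not caught by the except clause).
def Pre_linesToRecords (headers : List String) (lines : List (List String)) : Prop :=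
  lines ≠ [] ∧ lines.headD [] ≠ []
instance (headers : List String) (lines : List (List String)) : Decidable (Pre_linesToRecords headers lines) := by
  unfold Pre_linesToRecords; infer_instance
def pvWitness_linesToRecords : List String × List (List String) :=
  (["name", "", "qty"], [["trading securities"], ["bond A", "x", "100"], ["bond B"]])
def Spec_linesToRecords (headers : List String) (lines : List (List String)) (out : List (List (String × String))) : Prop := out = linesToRecords_alt headers lines
instance (headers : List String) (lines : List (List String)) (out : List (List (String × String))) : Decidable (Spec_linesToRecords headers lines out) := by unfold Spec_linesToRecords; infer_instance

-- ===== CLAIM (what is proved, stated in full; the proofs are below) =====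
def Claim_equal_linesToRecords : Prop := ∀ (headers : List String) (lines : List (List String)), Dom_linesToRecords headers lines → Pre_linesToRecords headers lines → Spec_linesToRecords headers lines (linesToRecords headers lines)

-- ===== LEMMAS AND PROOFS =====

-- zip of a mapped list with the list itself is a map producing pairs
theorem zip_map_self {α β : Type} (l : List α) (f : α → β) :
    (l.map f).zip l = l.map (fun x => (f x, x)) := by
  induction l with
  | nil => rfl
  | cons x xs ih => simp [ih]

-- the init is a lower bound of a foldl max
theorem init_le_foldl_max (l : List (List String)) (a : Int) :
    a ≤ l.foldl (fun m ln => max m (ln.length : Int)) a := by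
  induction l generalizing a with
  | nil => simp
  | cons x xs ih => exact le_trans (le_max_left _ _) (ih (max a (x.length : Int)))

-- every member's length is bounded by the foldl max
theorem mem_le_foldl_max (l : List (List String)) (a : Int) (x : List String) (hx : x ∈ l) :
    (x.length : Int) ≤ l.foldl (fun m ln => max m (ln.length : Int)) a := by
  induction l generalizing a with
  | nil => cases hx
  | cons y ys ih =>
    rcases List.mem_cons.mp hx with rfl | hx
    · exact le_trans (le_max_right _ _) (init_le_foldl_max ys _)
    · exact ih _ hx

-- Column-major fold over the enumerated headers cut off at M (an upper bound of every
-- line's length), applied to a state of the form body.map g, yields per line exactly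
-- A's fold over the filtered zip (started at g line).
theorem colfold_map (hdrs : List String) (body : List (List String)) (M : Int)
    (hM : ∀ ln ∈ body, (ln.length : Int) ≤ M) (s : Nat)
    (g : List String → PySem.Dict String String) :
    ((PySem.List.enumerate hdrs (s : Int)).takeWhile (fun p => decide (p.1 < M))).foldl
      (fun recs p =>
        if p.2 == "" then recs
        else (recs.zip body).map (fun q =>
          if p.1 < (q.2.length : Int) then q.1.insert p.2 (PySem.List.pyGetD q.2 p.1 "") else q.1))
      (body.map g)
    = body.map (fun ln =>
        ((hdrs.zip (ln.drop s)).filter (fun x => x.1 != "")).foldl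
          (fun d kv => d.insert kv.1 kv.2) (g ln)) := by
  induction hdrs generalizing s g with
  | nil => simp [PySem.List.enumerate_nil]
  | cons h hs ih =>
    rw [PySem.List.enumerate_cons, List.takeWhile_cons]
    by_cases hsM : (s : Int) < M
    case neg =>
      -- break: column s and all later ones lie beyond every line; nothing more is written
      simp only [decide_eq_true_eq, hsM, if_false, List.foldl_nil]
      refine (List.map_congr_left (fun ln hln => ?_)).symm
      have hdrop : ln.drop s = [] := by
        refine List.drop_eq_nil_iff.mpr ?_
        have := hM ln hln; omega
      simp [hdrop]
    simp only [decide_eq_true_eq, hsM, if_true]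
    have hcast : ((s : Int) + 1) = ((s + 1 : Nat) : Int) := by push_cast; ring
    -- per-line step function after processing column (s, h)
    have key : ∀ ln : List String,
        ((h :: hs).zip (ln.drop s)).filter (fun x => x.1 != "") =
        (if h = "" then [] else
          match ln.drop s with
          | [] => []
          | v :: _ => [(h, v)]) ++
        ((hs.zip (ln.drop (s+1))).filter (fun x => x.1 != "")) := by
      intro ln
      rcases hdrop : ln.drop s with _ | ⟨v, rest⟩
      · have hrest : ln.drop (s + 1) = [] :=
          List.drop_eq_nil_iff.mpr (by
            have := List.drop_eq_nil_iff.mp hdrop; omega)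
        simp [hrest]
      · have hrest : ln.drop (s + 1) = rest := by
          have ht : (ln.drop s).tail = ln.drop (s + 1) := List.tail_drop
          rw [hdrop] at ht; simpa using ht.symm
        by_cases hne : h = "" <;> simp [hrest, hne]
    by_cases hne : h = ""
    · subst hne
      simp only [List.foldl_cons]
      rw [if_pos (show (("" : String) == "") = true by decide)]
      rw [hcast, ih]
      refine List.map_congr_left (fun ln _ => ?_)
      rw [key ln]; simp
    · simp only [List.foldl_cons]
      rw [if_neg (show ¬ ((h == "") = true) by simp [hne])]
      rw [zip_map_self, List.map_map]
      have step :
          (fun q : PySem.Dict String String × List String =>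
            if (s : Int) < (q.2.length : Int) then q.1.insert h (PySem.List.pyGetD q.2 (s : Int) "") else q.1)
            ∘ (fun x => (g x, x))
          = fun ln => (fun d => if (s : Int) < (ln.length : Int) then d.insert h (PySem.List.pyGetD ln (s : Int) "") else d) (g ln) := by
        funext ln; rfl
      rw [step, hcast, ih]
      refine List.map_congr_left (fun ln _ => ?_)
      rw [key ln]
      rcases hdrop : ln.drop s with _ | ⟨v, rest⟩
      · have hle : ln.length ≤ s := List.drop_eq_nil_iff.mp hdrop
        have hnlt : ¬ ((s : Int) < (ln.length : Int)) := by exact_mod_cast not_lt.mpr hle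
        simp [hne, hnlt]
      · have hs_lt : s < ln.length := by
          by_contra hc
          simp [List.drop_eq_nil_iff.mpr (not_lt.mp hc)] at hdrop
        have hlt : (s : Int) < (ln.length : Int) := by exact_mod_cast hs_lt
        have hget : PySem.List.pyGetD ln (s : Int) "" = v := by
          have h0 : ln[s]? = some v := by
            have h1 : (ln.drop s)[0]? = some v := by simp [hdrop]
            simpa using h1
          simp [PySem.List.pyGetD_natCast, List.getD, h0]
        simp [hne, hlt, hget]

-- ===== VERDICT (by name: the statement is the Claim_ definition above) =====
theorem linesToRecords_spec : Claim_equal_linesToRecords := by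
  intro headers lines _ _
  unfold Spec_linesToRecords linesToRecords linesToRecords_alt
  cases getAccTreat (lines.headD []) <;>
    · simp only []
      rw [show PySem.List.enumerate headers (0 : Int) =
            PySem.List.enumerate headers ((0 : Nat) : Int) from by norm_num,
        colfold_map _ _ _ (fun ln hln => mem_le_foldl_max _ 0 ln hln)]
      rw [List.map_map, List.map_map]
      refine List.map_congr_left (fun line _ => ?_)
      simp
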